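-- pv_equiv track=rewrite | github.com/tvquizphd/abeci | src/modules/maps.py | toLetterMap
-- ===== SOURCE A (Python) =====
-- from bisect import bisect_left
--
-- def getVowelKey(s, vList):
--     uniq = set(s)
--     vow = [v for v in uniq if v in vList]
--     cNum = len(uniq) - len(vow)
--     vowX = vow if len(vow) else "x"
--     return "".join([str(cNum)] + sorted(vowX))
--
-- def toLetterMap(scoreMap, vList):
--     letterMap = {}
--     kScoreMap = {}
--     # Insure highest score combos first
--     for combo, score in scoreMap.items():
--         key = getVowelKey(combo, vList)
--         combos = letterMap.get(key, [])
--         scores = kScoreMap.get(key, [])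
--         newIndex = bisect_left(scores, -score)
--         scores.insert(newIndex, -score)
--         combos.insert(newIndex, combo)
--         letterMap[key] = combos
--         kScoreMap[key] = scores
--     letterMap[""] = []
--     return letterMap
-- ===== SOURCE B (Python) =====
-- def getVowelKey(s, vList):
--     uniq = set(s)
--     vow = sorted(c for c in uniq if c in vList)
--     return "".join([str(len(uniq) - len(vow))] + (vow or ["x"]))
--
-- def toLetterMap(scoreMap, vList):
--     # Bucket combos per vowel key in one pass, then stable-sort each
--     # reversed bucket by negated score: same descending-score,
--     # later-ties-first order without repeated bisect+list.insert.
--     buckets = {}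
--     for combo, score in scoreMap.items():
--         buckets.setdefault(getVowelKey(combo, vList), []).append((combo, score))
--     out = {k: [c for c, s in sorted(reversed(g), key=lambda p: -p[1])]
--            for k, g in buckets.items()}
--     out[""] = []
--     return out
-- ===== Notes on version B (the rewrite author's own statement) =====
-- stated objective: alternative
-- what changed: Instead of maintaining, per vowel key, a parallel pair of lists kept ordered by repeated bisect_left + list.insert, B buckets the (combo, score) pairs per key in one pass and then stable-sorts each reversed bucket by negated score, which yields exactly the same descending-score, later-ties-first order.
import Mathlib
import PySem

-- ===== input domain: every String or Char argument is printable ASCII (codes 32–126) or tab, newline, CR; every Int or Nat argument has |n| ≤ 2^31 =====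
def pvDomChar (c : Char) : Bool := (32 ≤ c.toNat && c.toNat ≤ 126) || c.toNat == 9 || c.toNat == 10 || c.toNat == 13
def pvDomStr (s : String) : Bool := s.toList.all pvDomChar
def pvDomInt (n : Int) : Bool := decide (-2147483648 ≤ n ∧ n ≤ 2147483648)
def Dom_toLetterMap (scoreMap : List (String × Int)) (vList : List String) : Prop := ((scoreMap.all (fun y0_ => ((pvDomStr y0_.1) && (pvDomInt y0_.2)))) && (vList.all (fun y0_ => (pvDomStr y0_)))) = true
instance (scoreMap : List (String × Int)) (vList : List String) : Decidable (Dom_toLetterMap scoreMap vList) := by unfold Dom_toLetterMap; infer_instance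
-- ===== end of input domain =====

-- B replaces A's per-key bisect_left + list.insert maintenance by one bucketing pass plus a
-- stable sort of each reversed bucket by negated score (same values, alternative algorithm).

-- ===== PORT A =====
-- getVowelKey of Source A ('v in vList' compares a one-char string against each element of vList)
def pvGetVowelKey (s : String) (vList : List String) : String :=
  let uniq := PySem.Set.ofList s.toList
  let vow := uniq.filter (fun c => vList.contains (String.mk [c]))
  let cNum : Int := (uniq.length : Int) - (vow.length : Int)
  let vowX := if vow.length ≠ 0 then vow else ['x']
  PySem.Str.join "" (PySem.Int.toStr cNum ::
    (PySem.List.sorted vowX (fun c => c) false).map (fun c => String.mk [c]))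

-- loop body of A: (letterMap, kScoreMap) updated for one (combo, score) item
def pvStepA (vList : List String)
    (st : PySem.Dict String (List String) × PySem.Dict String (List Int))
    (p : String × Int) :
    PySem.Dict String (List String) × PySem.Dict String (List Int) :=
  let key := pvGetVowelKey p.1 vList
  let combos := st.1.getD key []
  let scores := st.2.getD key []
  let newIndex := PySem.List.bisectLeft scores (-p.2)
  let scores' := PySem.List.insert scores (newIndex : Int) (-p.2)
  let combos' := PySem.List.insert combos (newIndex : Int) p.1
  (st.1.insert key combos', st.2.insert key scores')

def toLetterMap (scoreMap : List (String × Int)) (vList : List String) : List (String × List String) :=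
  -- the dict parameter: iteration is over the dict's items
  let items := (PySem.Dict.ofList scoreMap).items
  let st := items.foldl (pvStepA vList) (PySem.Dict.empty, PySem.Dict.empty)
  (st.1.insert "" []).items

-- ===== PORT B =====
-- getVowelKey of Source B
def pvGetVowelKeyB (s : String) (vList : List String) : String :=
  let uniq := PySem.Set.ofList s.toList
  let vow := PySem.List.sorted (uniq.filter (fun c => vList.contains (String.mk [c]))) (fun c => c) false
  PySem.Str.join "" (PySem.Int.toStr ((uniq.length : Int) - (vow.length : Int)) ::
    (if vow.isEmpty then ['x'] else vow).map (fun c => String.mk [c]))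

def pvStepB (vList : List String)
    (d : PySem.Dict String (List (String × Int))) (p : String × Int) :
    PySem.Dict String (List (String × Int)) :=
  d.modify (pvGetVowelKeyB p.1 vList) [] (· ++ [p])

def toLetterMap_alt (scoreMap : List (String × Int)) (vList : List String) : List (String × List String) :=
  let items := (PySem.Dict.ofList scoreMap).items
  let buckets := items.foldl (pvStepB vList) PySem.Dict.empty
  let out := PySem.Dict.ofList (buckets.items.map (fun kg =>
    (kg.1, (PySem.List.sorted kg.2.reverse (fun q => -q.2) false).map (fun q => q.1))))
  (out.insert "" []).items

-- ===== PRECONDITION & SPEC =====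
def Spec_toLetterMap (scoreMap : List (String × Int)) (vList : List String) (out : List (String × List String)) : Prop := out = toLetterMap_alt scoreMap vList
instance (scoreMap : List (String × Int)) (vList : List String) (out : List (String × List String)) : Decidable (Spec_toLetterMap scoreMap vList out) := by unfold Spec_toLetterMap; infer_instance

-- ===== CLAIM (what is proved, stated in full; the proofs are below) =====
def Claim_equal_toLetterMap : Prop := ∀ (scoreMap : List (String × Int)) (vList : List String), Dom_toLetterMap scoreMap vList → Spec_toLetterMap scoreMap vList (toLetterMap scoreMap vList)

-- ===== LEMMAS AND PROOFS =====

-- the two key functions agree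
theorem pvGK_eq (s : String) (vList : List String) :
    pvGetVowelKeyB s vList = pvGetVowelKey s vList := by
  unfold pvGetVowelKey pvGetVowelKeyB
  dsimp only
  set u := PySem.Set.ofList s.toList with hu
  set P := u.filter (fun c => vList.contains (String.mk [c])) with hPdef
  by_cases hP : P = []
  · rw [hP]; rfl
  · have h1 : (PySem.List.sorted P (fun c => c) false).isEmpty = false := by
      cases hEmpty : (PySem.List.sorted P (fun c => c) false).isEmpty
      · rfl
      · exact absurd ((PySem.List.sorted_eq_nil_iff P (fun c => c) false).mp
          (List.isEmpty_iff.mp hEmpty)) hP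
    have h2 : P.length ≠ 0 := fun h => hP (List.length_eq_zero_iff.mp h)
    rw [h1, PySem.List.length_sorted]
    simp only [Bool.false_eq_true, if_false, if_pos h2]

-- insertion before the first element of ≥ key (bisect_left order), on pairs
def pvInsP (x : String × Int) : List (String × Int) → List (String × Int)
  | [] => [x]
  | y :: ys => if -y.2 < -x.2 then y :: pvInsP x ys else x :: y :: ys

-- A's per-key list as a function of the reversed bucket
def pvCanon : List (String × Int) → List (String × Int)
  | [] => []
  | p :: r => pvInsP p (pvCanon r)

theorem pvInsP_mem (x z : String × Int) (L : List (String × Int)) :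
    z ∈ pvInsP x L ↔ z = x ∨ z ∈ L := by
  induction L with
  | nil => simp [pvInsP]
  | cons y ys ih =>
    simp only [pvInsP]
    split
    · simp only [List.mem_cons, ih]; tauto
    · simp only [List.mem_cons]

theorem pvInsP_pairwise (x : String × Int) (L : List (String × Int))
    (h : L.Pairwise (fun a b => -a.2 ≤ (-b.2 : Int))) :
    (pvInsP x L).Pairwise (fun a b => -a.2 ≤ (-b.2 : Int)) := by
  induction L with
  | nil => simp [pvInsP]
  | cons y ys ih =>
    rcases List.pairwise_cons.mp h with ⟨hy, hys⟩
    simp only [pvInsP]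
    split
    · rename_i hlt
      refine List.pairwise_cons.mpr ⟨?_, ih hys⟩
      intro z hz
      rcases (pvInsP_mem x z ys).mp hz with rfl | hz
      · omega
      · exact hy z hz
    · rename_i hnlt
      refine List.pairwise_cons.mpr ⟨?_, h⟩
      intro z hz
      rcases List.mem_cons.mp hz with rfl | hz
      · omega
      · have := hy z hz; omega

theorem pvCanon_pairwise (r : List (String × Int)) :
    (pvCanon r).Pairwise (fun a b => -a.2 ≤ (-b.2 : Int)) := by
  induction r with
  | nil => simp [pvCanon]
  | cons p r ih => exact pvInsP_pairwise p _ ih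

-- insertBy (bisect_right insertion) commutes with pvInsP (bisect_left insertion)
theorem pvIns_comm (acc : List (String × Int)) (x y : String × Int) :
    PySem.List.insertBy (fun a b => decide (-a.2 < (-b.2 : Int))) y (pvInsP x acc)
      = pvInsP x (PySem.List.insertBy (fun a b => decide (-a.2 < (-b.2 : Int))) y acc) := by
  induction acc with
  | nil =>
    by_cases h : x.2 < y.2
    · have h' : ¬ y.2 < x.2 := by omega
      simp [pvInsP, PySem.List.insertBy, h, h']
    · simp [pvInsP, PySem.List.insertBy, h]
  | cons z zs ih =>
    by_cases hzx : x.2 < z.2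
    · by_cases hyz : z.2 < y.2
      · have hyx : x.2 < y.2 := by omega
        simp [pvInsP, PySem.List.insertBy, hzx, hyz, hyx]
      · simp only [pvInsP, PySem.List.insertBy, hzx, hyz, if_pos, if_neg, decide_eq_true_eq]
        simp [pvInsP, PySem.List.insertBy, hzx, hyz]
        simpa using ih
    · by_cases hyz : z.2 < y.2
      · by_cases hyx : x.2 < y.2
        · simp [pvInsP, PySem.List.insertBy, hzx, hyz, hyx]
        · simp [pvInsP, PySem.List.insertBy, hzx, hyz, hyx]
      · have hyx : ¬ x.2 < y.2 := by omega
        simp [pvInsP, PySem.List.insertBy, hzx, hyz, hyx]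

theorem pvFoldl_insP (r : List (String × Int)) (x : String × Int) (acc : List (String × Int)) :
    r.foldl (fun acc z => PySem.List.insertBy (fun a b => decide (-a.2 < (-b.2 : Int))) z acc) (pvInsP x acc)
      = pvInsP x (r.foldl (fun acc z => PySem.List.insertBy (fun a b => decide (-a.2 < (-b.2 : Int))) z acc) acc) := by
  induction r generalizing acc with
  | nil => simp
  | cons z r ih =>
    simp only [List.foldl_cons]
    rw [pvIns_comm, ih]

theorem pvSorted_eq_canon (r : List (String × Int)) :
    PySem.List.sorted r (fun q => -q.2) false = pvCanon r := by
  induction r with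
  | nil => rfl
  | cons p r ih =>
    show (p :: r).foldl (fun acc z => PySem.List.insertBy (fun a b => decide (-a.2 < (-b.2 : Int))) z acc) [] = _
    have h0 : PySem.List.insertBy (fun a b => decide (-a.2 < (-b.2 : Int))) p [] = pvInsP p [] := rfl
    simp only [List.foldl_cons, h0, pvFoldl_insP]
    rw [show r.foldl (fun acc z => PySem.List.insertBy (fun a b => decide (-a.2 < (-b.2 : Int))) z acc) []
        = PySem.List.sorted r (fun q => -q.2) false from rfl, ih]
    rfl

theorem pvInsP_eq_takeDrop (x : String × Int) (L : List (String × Int)) :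
    pvInsP x L = L.takeWhile (fun y => decide (-y.2 < -x.2)) ++ x :: L.dropWhile (fun y => decide (-y.2 < -x.2)) := by
  induction L with
  | nil => simp [pvInsP]
  | cons y ys ih =>
    simp only [pvInsP, List.takeWhile_cons, List.dropWhile_cons]
    by_cases h : (-y.2 : Int) < -x.2
    · simp [h, ih]
    · simp [h]

theorem pvTakeWhile_facts {α : Type} (p : α → Bool) (L : List α) :
    (L.takeWhile p).length ≤ L.length ∧
    (∀ j (h : j < L.length), j < (L.takeWhile p).length → p L[j] = true) ∧
    (∀ h : (L.takeWhile p).length < L.length, p L[(L.takeWhile p).length] = false) := by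
  induction L with
  | nil => simp
  | cons y ys ih =>
    by_cases h : p y
    · simp only [List.takeWhile_cons, h, if_true, List.length_cons]
      refine ⟨by simpa using ih.1, ?_, ?_⟩
      · intro j hj hlt
        cases j with
        | zero => simpa using h
        | succ j => simpa using ih.2.1 j (by simpa using hj) (by omega)
      · intro hlt
        simpa using ih.2.2 (by omega)
    · simp only [List.takeWhile_cons, h, if_false]
      simp [h]

theorem pvBisect_eq (x : String × Int) (L : List (String × Int))
    (h : L.Pairwise (fun a b => -a.2 ≤ (-b.2 : Int))) :
    PySem.List.bisectLeft (L.map (fun q => -q.2)) (-x.2)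
      = (L.takeWhile (fun y => decide (-y.2 < -x.2))).length := by
  have hpw : (L.map (fun q => -q.2)).Pairwise (fun a b => a ≤ (b : Int)) :=
    List.pairwise_map.mpr h
  obtain ⟨hle, hlt, hge⟩ := PySem.List.bisectLeft_spec (L.map (fun q => -q.2)) (-x.2) hpw
  obtain ⟨tle, tlt, tge⟩ := pvTakeWhile_facts (fun y => decide (-y.2 < (-x.2 : Int))) L
  set n := PySem.List.bisectLeft (L.map (fun q => -q.2)) (-x.2) with hn
  set t := (L.takeWhile (fun y => decide (-y.2 < (-x.2 : Int)))).length with ht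
  have hlen : (L.map (fun q => -q.2)).length = L.length := List.length_map ..
  rcases lt_trichotomy n t with hc | hc | hc
  · exfalso
    have hnL : n < L.length := lt_of_lt_of_le hc tle
    have h1 := hge n (by omega) (le_refl n)
    have h2 := tlt n hnL hc
    simp only [List.getElem_map] at h1
    simp only [decide_eq_true_eq] at h2
    omega
  · exact hc
  · exfalso
    have htL : t < L.length := by omega
    have h1 := hlt t (by omega) hc
    have h2 := tge htL
    simp only [List.getElem_map] at h1
    simp only [decide_eq_false_iff_not] at h2
    omega

-- A's bisect_left + double insert on the projected lists is pvInsP on the paired list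
theorem pvStep_lists (x : String × Int) (L : List (String × Int))
    (h : L.Pairwise (fun a b => -a.2 ≤ (-b.2 : Int))) :
    PySem.List.insert (L.map (fun q => q.1)) ((PySem.List.bisectLeft (L.map (fun q => -q.2)) (-x.2) : Nat) : Int) x.1
        = (pvInsP x L).map (fun q => q.1) ∧
    PySem.List.insert (L.map (fun q => -q.2)) ((PySem.List.bisectLeft (L.map (fun q => -q.2)) (-x.2) : Nat) : Int) (-x.2)
        = (pvInsP x L).map (fun q => -q.2) := by
  obtain ⟨tle, -, -⟩ := pvTakeWhile_facts (fun y => decide (-y.2 < (-x.2 : Int))) L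
  rw [pvBisect_eq x L h]
  set t := (L.takeWhile (fun y => decide (-y.2 < (-x.2 : Int)))).length with ht
  have hsplit : L.takeWhile (fun y => decide (-y.2 < (-x.2 : Int))) ++ L.dropWhile (fun y => decide (-y.2 < (-x.2 : Int))) = L :=
    List.takeWhile_append_dropWhile ..
  have htw : List.take t L = L.takeWhile (fun y => decide (-y.2 < (-x.2 : Int))) := by
    conv_lhs => rw [← hsplit]
    exact List.take_left' ht.symm
  have hdw : List.drop t L = L.dropWhile (fun y => decide (-y.2 < (-x.2 : Int))) := by
    conv_lhs => rw [← hsplit]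
    exact List.drop_left' ht.symm
  constructor
  · rw [PySem.List.insert_natCast _ t _ (by simpa using tle)]
    rw [pvInsP_eq_takeDrop, List.map_append, List.map_cons,
        ← List.map_take, ← List.map_drop, htw, hdw]
  · rw [PySem.List.insert_natCast _ t _ (by simpa using tle)]
    rw [pvInsP_eq_takeDrop, List.map_append, List.map_cons,
        ← List.map_take, ← List.map_drop, htw, hdw]

-- keys of B's bucket dict stay duplicate-free
theorem pvBK_nodup (vList : List String) (l : List (String × Int)) :
    (l.foldl (pvStepB vList) PySem.Dict.empty).keys.Nodup := by
  exact PySem.Dict.nodup_keys_foldl_modify_key l (fun p => pvGetVowelKeyB p.1 vList) []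
    (fun _ p v => v ++ [p]) PySem.Dict.empty (by simp [PySem.Dict.keys_empty])

-- main loop invariant
theorem pvInv (vList : List String) (l : List (String × Int)) :
    (l.foldl (pvStepA vList) (PySem.Dict.empty, PySem.Dict.empty)).1.items
        = (l.foldl (pvStepB vList) PySem.Dict.empty).items.map
            (fun kg => (kg.1, (pvCanon kg.2.reverse).map (fun q => q.1))) ∧
    (∀ k, (l.foldl (pvStepA vList) (PySem.Dict.empty, PySem.Dict.empty)).1.getD k []
        = (pvCanon ((l.foldl (pvStepB vList) PySem.Dict.empty).getD k []).reverse).map (fun q => q.1)) ∧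
    (∀ k, (l.foldl (pvStepA vList) (PySem.Dict.empty, PySem.Dict.empty)).2.getD k []
        = (pvCanon ((l.foldl (pvStepB vList) PySem.Dict.empty).getD k []).reverse).map (fun q => -q.2)) := by
  induction l using List.reverseRecOn with
  | nil =>
    refine ⟨rfl, ?_, ?_⟩ <;> intro k <;>
      simp [PySem.Dict.getD_empty, pvCanon]
  | append_singleton l p ih =>
    obtain ⟨ih1, ih2, ih3⟩ := ih
    simp only [List.foldl_append, List.foldl_cons, List.foldl_nil]
    set st := l.foldl (pvStepA vList) (PySem.Dict.empty, PySem.Dict.empty) with hst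
    set bk := l.foldl (pvStepB vList) PySem.Dict.empty with hbk
    set k0 := pvGetVowelKeyB p.1 vList with hk0
    set old := bk.getD k0 [] with hold
    have hpw := pvCanon_pairwise old.reverse
    obtain ⟨hc1, hc2⟩ := pvStep_lists p (pvCanon old.reverse) hpw
    have hnew : pvCanon ((old ++ [p]).reverse) = pvInsP p (pvCanon old.reverse) := by
      rw [List.reverse_append]; rfl
    have hnew' : pvCanon (p :: old.reverse) = pvInsP p (pvCanon old.reverse) := rfl
    have hstepA : pvStepA vList st p =
        (st.1.insert k0 ((pvInsP p (pvCanon old.reverse)).map (fun q => q.1)),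
         st.2.insert k0 ((pvInsP p (pvCanon old.reverse)).map (fun q => -q.2))) := by
      unfold pvStepA
      dsimp only
      rw [← pvGK_eq p.1 vList, ← hk0, ih2 k0, ih3 k0, ← hold, hc1, hc2]
    have hstepB : pvStepB vList bk p = bk.insert k0 (old ++ [p]) := by
      unfold pvStepB
      rw [← hk0, PySem.Dict.modify, ← hold]
    rw [hstepA, hstepB]
    have hcont : ∀ k, st.1.contains k = bk.contains k := by
      intro k
      simp only [PySem.Dict.contains, ih1, List.any_map]
      rfl
    refine ⟨?_, ?_, ?_⟩
    · by_cases hct : bk.contains k0 = true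
      · rw [PySem.Dict.items_insert_of_contains _ _ ((hcont k0).trans hct),
            PySem.Dict.items_insert_of_contains _ _ hct, ih1, List.map_map, List.map_map]
        refine List.map_congr_left ?_
        intro q _
        by_cases hqk : q.1 = k0
        · simp only [Function.comp_apply, hqk, beq_self_eq_true, if_true, hnew]
        · simp only [Function.comp_apply, beq_iff_eq, hqk, if_false]
      · have hct' : bk.contains k0 = false := by simpa using hct
        rw [PySem.Dict.items_insert_of_not_contains _ _ ((hcont k0).trans hct'),
            PySem.Dict.items_insert_of_not_contains _ _ hct', ih1, List.map_append]
        simp [hnew, hnew']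
    · intro k
      rw [PySem.Dict.getD_insert, PySem.Dict.getD_insert]
      by_cases hk : k = k0
      · simp [hk, hnew, hnew']
      · simp [hk, ih2 k]
    · intro k
      rw [PySem.Dict.getD_insert, PySem.Dict.getD_insert]
      by_cases hk : k = k0
      · simp [hk, hnew, hnew']
      · simp [hk, ih3 k]

-- a dict literal built from distinct keys has exactly those items
theorem pvOfList_items (ps : List (String × List String))
    (h : (ps.map Prod.fst).Nodup) : (PySem.Dict.ofList ps).items = ps := by
  have := PySem.Dict.items_foldl_insert_fresh ps Prod.fst Prod.snd PySem.Dict.empty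
    (fun a _ => PySem.Dict.contains_empty _) h
  simpa using this

-- ===== VERDICT (by name: the statement is the Claim_ definition above) =====
theorem toLetterMap_spec : Claim_equal_toLetterMap := by
  intro scoreMap vList _
  unfold Spec_toLetterMap toLetterMap toLetterMap_alt
  dsimp only
  set l := (PySem.Dict.ofList scoreMap).items with hl
  set st := l.foldl (pvStepA vList) (PySem.Dict.empty, PySem.Dict.empty) with hst
  set bk := l.foldl (pvStepB vList) PySem.Dict.empty with hbk
  obtain ⟨h1, -, -⟩ := pvInv vList l
  have hf : bk.items.map (fun kg =>
      (kg.1, (PySem.List.sorted kg.2.reverse (fun q => -q.2) false).map (fun q => q.1)))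
      = bk.items.map (fun kg => (kg.1, (pvCanon kg.2.reverse).map (fun q => q.1))) :=
    List.map_congr_left fun kg _ => by rw [pvSorted_eq_canon]
  have hnodup : ((bk.items.map (fun kg => (kg.1, (pvCanon kg.2.reverse).map (fun q => q.1)))).map Prod.fst).Nodup := by
    rw [List.map_map]
    exact pvBK_nodup vList l
  have hout : (PySem.Dict.ofList (bk.items.map (fun kg =>
      (kg.1, (PySem.List.sorted kg.2.reverse (fun q => -q.2) false).map (fun q => q.1))))).items
      = st.1.items := by
    rw [hf, pvOfList_items _ hnodup, h1]
  have hdict : st.1 = PySem.Dict.ofList (bk.items.map (fun kg =>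
      (kg.1, (PySem.List.sorted kg.2.reverse (fun q => -q.2) false).map (fun q => q.1)))) :=
    PySem.Dict.ext hout.symm
  rw [← hdict]
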